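-- pv_equiv track=rewrite | github.com/Tim-Nosco/sboxgen | linear.py | check
-- ===== SOURCE A (Python) =====
-- BITS=6
--
-- MAXVAL = 2**BITS
--
-- MAXROW = 2**(BITS//2)
--
-- def fmt_split(x):
-- 	mask = (1<<(BITS//2))-1
-- 	return (x>>(BITS//2))&mask, x&mask
--
-- def check(sbox):
-- 	if set(sbox)!=set(range(MAXVAL)):
-- 		return False
-- 	lo, hi = zip(*map(fmt_split,sbox))
-- 	row_vals = set(range(MAXROW))
-- 	for l in lo,hi:
-- 		for i in range(MAXROW):
-- 			row = l[i*MAXROW:(i+1)*MAXROW]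
-- 			if set(row)!=row_vals:
-- 				return False
-- 			col = l[i::MAXROW]
-- 			if set(col)!=row_vals:
-- 				return False
-- 	return True
-- ===== SOURCE B (Python) =====
-- BITS = 6
--
-- MAXVAL = 2**BITS
--
-- MAXROW = 2**(BITS//2)
--
-- def fmt_split(x):
-- 	mask = (1<<(BITS//2))-1
-- 	return (x>>(BITS//2))&mask, x&mask
--
-- def check(sbox):
-- 	if set(sbox) != set(range(MAXVAL)):
-- 		return False
-- 	lo, hi = zip(*map(fmt_split, sbox))
-- 	for l in lo, hi:
-- 		rows = {}
-- 		cols = {}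
-- 		for idx, v in enumerate(l):
-- 			rows.setdefault(idx // MAXROW, set()).add(v)
-- 			cols.setdefault(idx % MAXROW, set()).add(v)
-- 		for i in range(MAXROW):
-- 			if len(rows.get(i, set())) != MAXROW or len(cols.get(i, set())) != MAXROW:
-- 				return False
-- 	return True
-- ===== Notes on version B (the rewrite author's own statement) =====
-- stated objective: alternative
-- what changed: A validates each half by slicing out each of the 8 rows and 8 stride-8 columns and comparing each slice's set to {0..7}; B makes a single bucketing pass per half, distributing each value into a row bucket (index//8) and a column bucket (index%8) kept in two dicts of sets, and then just checks every bucket has 8 elements.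
import Mathlib
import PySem

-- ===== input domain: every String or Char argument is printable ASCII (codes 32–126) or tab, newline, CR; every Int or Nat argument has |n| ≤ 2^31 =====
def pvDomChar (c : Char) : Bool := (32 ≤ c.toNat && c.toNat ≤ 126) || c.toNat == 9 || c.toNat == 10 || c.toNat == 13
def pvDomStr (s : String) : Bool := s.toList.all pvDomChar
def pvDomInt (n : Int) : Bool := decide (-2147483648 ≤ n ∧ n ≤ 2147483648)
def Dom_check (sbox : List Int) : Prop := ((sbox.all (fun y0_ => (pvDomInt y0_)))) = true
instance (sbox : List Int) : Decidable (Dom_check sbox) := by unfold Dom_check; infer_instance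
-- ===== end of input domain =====

-- B replaces A's per-row/per-column slicing with one bucketing pass per half (alternative decomposition, same cost).

-- ===== PORT A =====
def fmt_split (x : Int) : Int × Int :=
  let mask : Int := (1 <<< (6 / 2 : Nat)) - 1
  (PySem.Int.band (x >>> (6 / 2 : Nat)) mask, PySem.Int.band x mask)

def check (sbox : List Int) : Bool :=
  if !(PySem.Set.equal (PySem.Set.ofList sbox) (PySem.Set.ofList (PySem.List.pyRange 0 64 1))) then
    false
  else
    let pairs := sbox.map fmt_split
    let lo := pairs.map (·.1)
    let hi := pairs.map (·.2)
    let row_vals := PySem.Set.ofList (PySem.List.pyRange 0 8 1)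
    [lo, hi].all (fun l =>
      (PySem.List.pyRange 0 8 1).all (fun i =>
        let row := PySem.List.slice l (some (i * 8)) (some ((i + 1) * 8))
        let col := (PySem.List.slice? l (some i) none 8).getD []
        PySem.Set.equal (PySem.Set.ofList row) row_vals &&
        PySem.Set.equal (PySem.Set.ofList col) row_vals))

-- ===== PORT B =====
def check_alt (sbox : List Int) : Bool :=
  if !(PySem.Set.equal (PySem.Set.ofList sbox) (PySem.Set.ofList (PySem.List.pyRange 0 64 1))) then
    false
  else
    let pairs := sbox.map fmt_split
    let lo := pairs.map (·.1)
    let hi := pairs.map (·.2)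
    [lo, hi].all (fun l =>
      let rc := (PySem.List.enumerate l).foldl
        (fun (rc : PySem.Dict Int (PySem.Set Int) × PySem.Dict Int (PySem.Set Int)) p =>
          (rc.1.modify (PySem.Int.floordiv p.1 8) PySem.Set.empty (fun s => PySem.Set.add s p.2),
           rc.2.modify (PySem.Int.mod p.1 8) PySem.Set.empty (fun s => PySem.Set.add s p.2)))
        (PySem.Dict.empty, PySem.Dict.empty)
      (PySem.List.pyRange 0 8 1).all (fun i =>
        (PySem.Set.len (rc.1.getD i PySem.Set.empty) == 8) &&
        (PySem.Set.len (rc.2.getD i PySem.Set.empty) == 8)))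

-- ===== PRECONDITION & SPEC =====
def Spec_check (sbox : List Int) (out : Bool) : Prop := out = check_alt sbox
instance (sbox : List Int) (out : Bool) : Decidable (Spec_check sbox out) := by unfold Spec_check; infer_instance

-- ===== CLAIM (what is proved, stated in full; the proofs are below) =====
def Claim_equal_check : Prop := ∀ (sbox : List Int), Dom_check sbox → Spec_check sbox (check sbox)

-- ===== LEMMAS AND PROOFS =====

theorem band_seven (a : Int) : PySem.Int.band a 7 = PySem.Int.mod a 8 := by
  have h7 : ∀ m : Nat, m &&& 7 = m % 8 := fun m => by
    have := Nat.and_two_pow_sub_one_eq_mod m 3; norm_num at this; omega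
  have hfm : a.fmod 8 = a % 8 := by rw [Int.fmod_eq_emod]; simp
  have h3 : Int.toNat 7 = 7 := rfl
  simp only [PySem.Int.band, PySem.Int.mod]
  rw [hfm]
  by_cases ha : 0 ≤ a
  · simp only [if_pos ha, if_pos (by norm_num : (0:Int) ≤ 7), h3]
    have := h7 a.toNat
    omega
  · simp only [if_neg ha, if_pos (by norm_num : (0:Int) ≤ 7), h3]
    have : 7 &&& (-a - 1).toNat = (-a - 1).toNat % 8 := by rw [Nat.and_comm]; exact h7 _
    omega

theorem fmt_split_bounds (x : Int) :
    (0 ≤ (fmt_split x).1 ∧ (fmt_split x).1 < 8) ∧ (0 ≤ (fmt_split x).2 ∧ (fmt_split x).2 < 8) := by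
  have hm : ((1 <<< (6 / 2 : Nat) : Int) - 1) = 7 := by decide
  simp only [fmt_split, hm, band_seven]
  exact ⟨⟨PySem.Int.mod_nonneg _ (by norm_num), PySem.Int.mod_lt _ (by norm_num)⟩,
         ⟨PySem.Int.mod_nonneg _ (by norm_num), PySem.Int.mod_lt _ (by norm_num)⟩⟩

theorem getD_foldl_modify_setadd (key : Int × Int → Int) (l : List (Int × Int))
    (d : PySem.Dict Int (PySem.Set Int)) (c : Int) :
    ((l.foldl (fun d p => d.modify (key p) PySem.Set.empty (fun s => PySem.Set.add s p.2)) d).getD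
        c PySem.Set.empty) =
      PySem.Set.update (d.getD c PySem.Set.empty) ((l.filter (fun p => key p == c)).map (·.2)) := by
  induction l generalizing d with
  | nil => simp [PySem.Set.update_nil]
  | cons p rest ih =>
    simp only [List.foldl_cons, List.filter_cons]
    rw [ih]
    by_cases h : key p = c
    · simp only [h, beq_self_eq_true, if_pos trivial, List.map_cons, PySem.Set.update_cons,
        PySem.Dict.getD_modify_self]
    · have hb : (key p == c) = false := by simp [h]
      simp only [hb, Bool.false_eq_true, if_false]
      rw [PySem.Dict.getD_modify_of_ne]
      exact fun hc => h (hc ▸ rfl)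

theorem mem_drop_take (l : List Int) (m n : Nat) (v : Int) :
    v ∈ (l.drop m).take n ↔ ∃ j, m ≤ j ∧ j < m + n ∧ l[j]? = some v := by
  have hlen : ((l.drop m).take n).length = min n (l.length - m) := by
    simp [List.length_take, List.length_drop]
  constructor
  · intro hv
    obtain ⟨k, hk, hget⟩ := List.mem_iff_getElem.mp hv
    have hk' : k < n ∧ m + k < l.length := by omega
    refine ⟨m + k, Nat.le_add_right _ _, by omega, ?_⟩
    rw [List.getElem_take, List.getElem_drop] at hget
    rw [List.getElem?_eq_getElem (by omega)]
    exact congrArg some hget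
  · rintro ⟨j, hmj, hjn, hget⟩
    have hj : j < l.length := by
      by_contra h
      rw [List.getElem?_eq_none (by omega)] at hget
      simp at hget
    rw [List.getElem?_eq_getElem hj] at hget
    apply List.mem_iff_getElem.mpr
    refine ⟨j - m, by omega, ?_⟩
    rw [List.getElem_take, List.getElem_drop]
    have h2 : m + (j - m) = j := by omega
    simp only [h2]
    exact Option.some.inj hget

theorem mem_col_slice (l : List Int) (k : Nat) (hk : k < 8) (v : Int) :
    v ∈ (PySem.List.slice? l (some (k : Int)) none 8).getD [] ↔
      ∃ j, j % 8 = k ∧ l[j]? = some v := by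
  simp only [PySem.List.slice?, PySem.List.sliceIndices]
  norm_num
  rw [if_neg (by omega : ¬ ((k:Int) < 0))]
  by_cases hkl : k < l.length
  · rw [min_eq_left (by exact_mod_cast Nat.le_of_lt hkl)]
    rw [if_pos (by exact_mod_cast hkl)]
    constructor
    · rintro ⟨a, ha, hget⟩
      refine ⟨k + 8 * a, by omega, ?_⟩
      have : ((k:Int) + 8 * (a:Int)).toNat = k + 8 * a := by omega
      rwa [this] at hget
    · rintro ⟨j, hj8, hget⟩
      have hjl : j < l.length := (List.getElem?_eq_some_iff.mp hget).1
      have ha : j = k + 8 * ((j - k) / 8) := by omega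
      refine ⟨(j - k) / 8, by omega, ?_⟩
      have : ((k:Int) + 8 * (((j - k) / 8 : Nat):Int)).toNat = j := by omega
      rw [this]; exact hget
  · rw [min_eq_right (by exact_mod_cast Nat.le_of_not_lt hkl)]
    rw [if_neg (by omega)]
    constructor
    · rintro ⟨a, ha, _⟩; omega
    · rintro ⟨j, hj8, hget⟩
      have hjl : j < l.length := (List.getElem?_eq_some_iff.mp hget).1
      omega

theorem setcrit (s : List Int) (hnd : s.Nodup) (hsub : ∀ v ∈ s, 0 ≤ v ∧ v < 8) :
    PySem.Set.equal s (PySem.Set.ofList (PySem.List.pyRange 0 8 1)) =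
      (PySem.Set.len s == 8) := by
  have hr : PySem.Set.ofList (PySem.List.pyRange 0 8 1) = PySem.List.pyRange 0 8 1 :=
    PySem.Set.ofList_eq_self_of_nodup _ (PySem.List.nodup_pyRange_one 0 8)
  have hrlen : (PySem.List.pyRange 0 8 1).length = 8 := by decide
  have hsublist : s ⊆ PySem.List.pyRange 0 8 1 := by
    intro x hx
    rw [PySem.List.mem_pyRange_one]
    exact ⟨(hsub x hx).1, (hsub x hx).2⟩
  rw [hr]
  have hlen : PySem.Set.len s = (s.length : Int) := by simp [PySem.Set.len]
  apply Bool.eq_iff_iff.mpr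
  rw [PySem.Set.equal_iff]
  constructor
  · intro h
    have : s.Perm (PySem.List.pyRange 0 8 1) :=
      (List.perm_ext_iff_of_nodup hnd (PySem.List.nodup_pyRange_one 0 8)).mpr h
    have := this.length_eq
    simp only [hlen, beq_iff_eq]
    omega
  · intro h
    simp only [hlen, beq_iff_eq] at h
    have hslen : s.length = 8 := by omega
    have hperm : s.Perm (PySem.List.pyRange 0 8 1) := by
      refine (List.subperm_of_subset hnd hsublist).perm_of_length_le (by omega)
    intro x
    exact ⟨fun hx => hperm.mem_iff.mp hx, fun hx => hperm.mem_iff.mpr hx⟩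

theorem equal_of_mem_iff (s t u : List Int) (h : ∀ x, x ∈ s ↔ x ∈ t) :
    PySem.Set.equal s u = PySem.Set.equal t u := by
  apply Bool.eq_iff_iff.mpr
  rw [PySem.Set.equal_iff, PySem.Set.equal_iff]
  constructor
  · intro hs x; rw [← h x]; exact hs x
  · intro ht x; rw [h x]; exact ht x

theorem crit_of_mem_iff (b s : List Int) (hbnd : ∀ v ∈ b, 0 ≤ v ∧ v < 8) (hnd : b.Nodup)
    (h : ∀ x, x ∈ s ↔ x ∈ b) :
    PySem.Set.equal (PySem.Set.ofList s) (PySem.Set.ofList (PySem.List.pyRange 0 8 1)) =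
      (PySem.Set.len b == 8) := by
  rw [equal_of_mem_iff (PySem.Set.ofList s) b _
    (fun x => by rw [PySem.Set.mem_ofList]; exact h x)]
  exact setcrit b hnd hbnd

theorem all_congr_bool (l : List Int) (f g : Int → Bool) (h : ∀ x ∈ l, f x = g x) :
    l.all f = l.all g := by
  induction l with
  | nil => rfl
  | cons a rest ih =>
    simp only [List.all_cons, h a (List.mem_cons_self), ih (fun x hx => h x (List.mem_cons_of_mem _ hx))]

theorem half_eq (l : List Int) (hb : ∀ v ∈ l, 0 ≤ v ∧ v < 8) :
    ((PySem.List.pyRange 0 8 1).all (fun i =>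
        PySem.Set.equal (PySem.Set.ofList (PySem.List.slice l (some (i * 8)) (some ((i + 1) * 8))))
            (PySem.Set.ofList (PySem.List.pyRange 0 8 1)) &&
        PySem.Set.equal (PySem.Set.ofList ((PySem.List.slice? l (some i) none 8).getD []))
            (PySem.Set.ofList (PySem.List.pyRange 0 8 1)))) =
    ((PySem.List.pyRange 0 8 1).all (fun i =>
        (PySem.Set.len ((((PySem.List.enumerate l).foldl (fun (rc : PySem.Dict Int (PySem.Set Int) × PySem.Dict Int (PySem.Set Int)) p =>
          (rc.1.modify (PySem.Int.floordiv p.1 8) PySem.Set.empty (fun s => PySem.Set.add s p.2),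
           rc.2.modify (PySem.Int.mod p.1 8) PySem.Set.empty (fun s => PySem.Set.add s p.2)))
            (PySem.Dict.empty, PySem.Dict.empty)).1).getD i PySem.Set.empty) == 8) &&
        (PySem.Set.len ((((PySem.List.enumerate l).foldl (fun (rc : PySem.Dict Int (PySem.Set Int) × PySem.Dict Int (PySem.Set Int)) p =>
          (rc.1.modify (PySem.Int.floordiv p.1 8) PySem.Set.empty (fun s => PySem.Set.add s p.2),
           rc.2.modify (PySem.Int.mod p.1 8) PySem.Set.empty (fun s => PySem.Set.add s p.2)))
            (PySem.Dict.empty, PySem.Dict.empty)).2).getD i PySem.Set.empty) == 8))) := by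
  apply all_congr_bool
  intro i hi
  rw [PySem.List.mem_pyRange_one] at hi
  obtain ⟨k, rfl⟩ : ∃ k : Nat, i = (k : Int) := ⟨i.toNat, by omega⟩
  have hk : k < 8 := by omega
  -- split the paired fold into two independent folds
  have hsplit : ((PySem.List.enumerate l).foldl (fun (rc : PySem.Dict Int (PySem.Set Int) × PySem.Dict Int (PySem.Set Int)) p =>
          (rc.1.modify (PySem.Int.floordiv p.1 8) PySem.Set.empty (fun s => PySem.Set.add s p.2),
           rc.2.modify (PySem.Int.mod p.1 8) PySem.Set.empty (fun s => PySem.Set.add s p.2)))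
            (PySem.Dict.empty, PySem.Dict.empty)) =
      ((PySem.List.enumerate l).foldl (fun (d : PySem.Dict Int (PySem.Set Int)) (p : Int × Int) => d.modify (PySem.Int.floordiv p.1 8) PySem.Set.empty (fun s => PySem.Set.add s p.2)) PySem.Dict.empty,
       (PySem.List.enumerate l).foldl (fun (d : PySem.Dict Int (PySem.Set Int)) (p : Int × Int) => d.modify (PySem.Int.mod p.1 8) PySem.Set.empty (fun s => PySem.Set.add s p.2)) PySem.Dict.empty) :=
    PySem.List.foldl_prod_mk
      (f := fun (d : PySem.Dict Int (PySem.Set Int)) (p : Int × Int) => d.modify (PySem.Int.floordiv p.1 8) PySem.Set.empty (fun s => PySem.Set.add s p.2))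
      (g := fun (d : PySem.Dict Int (PySem.Set Int)) (p : Int × Int) => d.modify (PySem.Int.mod p.1 8) PySem.Set.empty (fun s => PySem.Set.add s p.2))
      _ _ _
  rw [hsplit]
  rw [getD_foldl_modify_setadd, getD_foldl_modify_setadd, PySem.Dict.getD_empty,
      PySem.Set.update_empty, PySem.Set.update_empty]
  -- values feeding each bucket come from l
  have hvals : ∀ (q : Int × Int → Int) (v : Int),
      v ∈ (((PySem.List.enumerate l).filter (fun p => q p == (k : Int))).map (·.2)) → v ∈ l := by
    intro q v hv
    simp only [List.mem_map, List.mem_filter] at hv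
    obtain ⟨p, ⟨hp, _⟩, rfl⟩ := hv
    simp only [PySem.List.mem_enumerate_iff] at hp
    obtain ⟨j, hj, rfl⟩ := hp
    exact List.getElem_mem hj
  have hfd : ∀ j : Nat, PySem.Int.floordiv (j:Int) 8 = ((j/8 : Nat):Int) := fun j => by
    exact_mod_cast PySem.Int.floordiv_natCast j 8
  have hmd : ∀ j : Nat, PySem.Int.mod (j:Int) 8 = ((j%8 : Nat):Int) := fun j => by
    exact_mod_cast PySem.Int.mod_natCast j 8
  congr 1
  · rw [crit_of_mem_iff
      (PySem.Set.ofList (((PySem.List.enumerate l).filter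
        (fun p => PySem.Int.floordiv p.1 8 == (k : Int))).map (·.2)))]
    · intro v hv
      exact hb v (hvals _ v ((PySem.Set.mem_ofList _ _).mp hv))
    · exact PySem.Set.nodup_ofList _
    · intro x
      rw [PySem.Set.mem_ofList]
      have hsl : PySem.List.slice l (some ((k : Int) * 8)) (some (((k : Int) + 1) * 8)) =
          (l.drop (k * 8)).take 8 := by
        have e1 : (((k:Int)) * 8).toNat = k * 8 := by omega
        have e2 : ((((k:Int)) + 1) * 8).toNat = k * 8 + 8 := by omega
        rw [PySem.List.slice_toNat _ (by positivity) (by positivity), e1, e2]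
        congr 1
        omega
      rw [hsl, mem_drop_take]
      simp only [List.mem_map, List.mem_filter]
      constructor
      · rintro ⟨j, h1, h2, hget⟩
        have hjl : j < l.length := (List.getElem?_eq_some_iff.mp hget).1
        refine ⟨((j : Int), l[j]), ⟨?_, ?_⟩, ?_⟩
        · simp only [PySem.List.mem_enumerate_iff]
          exact ⟨j, hjl, by simp⟩
        · simp only [beq_iff_eq, hfd j]
          exact_mod_cast congrArg (Nat.cast : Nat → Int) (by omega : j / 8 = k)
        · have h := hget
          rw [List.getElem?_eq_getElem hjl] at h
          exact Option.some.inj h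
      · rintro ⟨p, ⟨hp, hq⟩, rfl⟩
        simp only [PySem.List.mem_enumerate_iff] at hp
        obtain ⟨j, hjl, rfl⟩ := hp
        simp only [zero_add, beq_iff_eq, hfd j] at hq
        have hjk : j / 8 = k := by exact_mod_cast hq
        exact ⟨j, by omega, by omega, List.getElem?_eq_getElem hjl⟩
  · rw [crit_of_mem_iff
      (PySem.Set.ofList (((PySem.List.enumerate l).filter
        (fun p => PySem.Int.mod p.1 8 == (k : Int))).map (·.2)))]
    · intro v hv
      exact hb v (hvals _ v ((PySem.Set.mem_ofList _ _).mp hv))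
    · exact PySem.Set.nodup_ofList _
    · intro x
      rw [PySem.Set.mem_ofList, mem_col_slice l k hk]
      simp only [List.mem_map, List.mem_filter]
      constructor
      · rintro ⟨j, h1, hget⟩
        have hjl : j < l.length := (List.getElem?_eq_some_iff.mp hget).1
        refine ⟨((j : Int), l[j]), ⟨?_, ?_⟩, ?_⟩
        · simp only [PySem.List.mem_enumerate_iff]
          exact ⟨j, hjl, by simp⟩
        · simp only [beq_iff_eq, hmd j]
          exact_mod_cast congrArg (Nat.cast : Nat → Int) h1
        · have h := hget
          rw [List.getElem?_eq_getElem hjl] at h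
          exact Option.some.inj h
      · rintro ⟨p, ⟨hp, hq⟩, rfl⟩
        simp only [PySem.List.mem_enumerate_iff] at hp
        obtain ⟨j, hjl, rfl⟩ := hp
        simp only [zero_add, beq_iff_eq, hmd j] at hq
        have hjk : j % 8 = k := by exact_mod_cast hq
        exact ⟨j, hjk, List.getElem?_eq_getElem hjl⟩

-- ===== VERDICT (by name: the statement is the Claim_ definition above) =====
theorem check_spec : Claim_equal_check := by
  intro sbox _
  unfold Spec_check check check_alt
  by_cases hg : PySem.Set.equal (PySem.Set.ofList sbox)
      (PySem.Set.ofList (PySem.List.pyRange 0 64 1)) = true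
  · simp only [hg, Bool.not_true, Bool.false_eq_true, if_false, List.all_cons, List.all_nil,
      Bool.and_true]
    have hlo : ∀ v ∈ (sbox.map fmt_split).map (·.1), 0 ≤ v ∧ v < 8 := by
      intro v hv
      simp only [List.mem_map] at hv
      obtain ⟨p, ⟨x, _, rfl⟩, rfl⟩ := hv
      exact (fmt_split_bounds x).1
    have hhi : ∀ v ∈ (sbox.map fmt_split).map (·.2), 0 ≤ v ∧ v < 8 := by
      intro v hv
      simp only [List.mem_map] at hv
      obtain ⟨p, ⟨x, _, rfl⟩, rfl⟩ := hv
      exact (fmt_split_bounds x).2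
    rw [half_eq _ hlo, half_eq _ hhi]
  · simp only [Bool.not_eq_true] at hg
    simp [hg]
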